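-- pv_equiv track=rewrite | github.com/pypi-data/pypi-mirror-256 | packages/nsrx/nsrx-0.0.1.tar.gz/nsrx-0.0.1/nsrx_class/all_policy_type.py | values_after
-- ===== SOURCE A (Python) =====
-- def values_after(mylist,after_value):
--     # Initialize variables
--     found_values_between = []
--     if after_value == 'Src': search_range = 5
--     if after_value == 'Dst': search_range = 10
--     if after_value == 'Ser': search_range = 15
--
--     for index in range(search_range,search_range + 5):
--         try:
--             if mylist[index] != "":found_values_between.append(mylist[index])
--         except:
--             pass
--     return found_values_between
-- ===== SOURCE B (Python) =====
-- def values_after(mylist, after_value):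
--     start = {'Src': 5, 'Dst': 10, 'Ser': 15}[after_value]
--     return [v for i, v in enumerate(mylist) if start <= i < start + 5 and v != '']
-- ===== Notes on version B (the rewrite author's own statement) =====
-- stated objective: alternative
-- what changed: B replaces A's indexed range loop with per-index try/except by a dict lookup of the window start and a single enumerate scan of the whole list that keeps elements whose position lies in [start, start+5) and which are non-empty.
import Mathlib
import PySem

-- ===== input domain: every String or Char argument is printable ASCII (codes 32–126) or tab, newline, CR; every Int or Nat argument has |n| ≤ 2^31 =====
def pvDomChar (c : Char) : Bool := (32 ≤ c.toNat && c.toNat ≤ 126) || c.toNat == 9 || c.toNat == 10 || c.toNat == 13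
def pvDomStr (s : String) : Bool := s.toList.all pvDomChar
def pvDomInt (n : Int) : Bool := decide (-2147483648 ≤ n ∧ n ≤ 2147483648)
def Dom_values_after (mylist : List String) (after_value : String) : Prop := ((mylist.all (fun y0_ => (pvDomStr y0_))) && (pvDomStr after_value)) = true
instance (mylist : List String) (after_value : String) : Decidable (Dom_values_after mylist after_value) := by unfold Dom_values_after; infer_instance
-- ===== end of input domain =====

-- B replaces A's indexed range loop with per-index try/except by a dict lookup of
-- the window start and a single enumerate scan keeping non-empty elements whose
-- position lies in [start, start+5) (objective: alternative).

-- ===== PORT A =====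
-- A's three sequential bare if-statements, each overwriting search_range; the
-- uninitialized case (UnboundLocalError) is excluded by Pre_ (sr0 = 0 is a stand-in).
def values_after (mylist : List String) (after_value : String) : List String :=
  let sr0 : Int := 0
  let sr1 : Int := if after_value == "Src" then 5 else sr0
  let sr2 : Int := if after_value == "Dst" then 10 else sr1
  let sr3 : Int := if after_value == "Ser" then 15 else sr2
  (PySem.List.pyRange sr3 (sr3 + 5) 1).foldl
    (fun acc i =>
      match PySem.List.pyGet? mylist i with
      | some v => if v ≠ "" then acc ++ [v] else acc
      | none => acc)  -- except: pass
    []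

-- ===== PORT B =====
-- dict lookup (KeyError = none, excluded by Pre_), then one enumerate scan with
-- a position test (the comprehension's filter) and projection to the value.
def values_after_alt (mylist : List String) (after_value : String) : List String :=
  let offsets : PySem.Dict String Int := PySem.Dict.ofList [("Src", 5), ("Dst", 10), ("Ser", 15)]
  match offsets.get? after_value with
  | none => []
  | some start =>
      ((PySem.List.enumerate mylist 0).filter
        (fun p => decide (start ≤ p.1) && decide (p.1 < start + 5) && decide (p.2 ≠ ""))).map (·.2)

-- ===== PRECONDITION & SPEC =====
-- Pre_ excludes exactly the after_value strings on which A raises UnboundLocalError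
-- (and B raises KeyError): anything other than "Src"/"Dst"/"Ser".
def Pre_values_after (mylist : List String) (after_value : String) : Prop :=
  after_value = "Src" ∨ after_value = "Dst" ∨ after_value = "Ser"
instance (mylist : List String) (after_value : String) : Decidable (Pre_values_after mylist after_value) := by unfold Pre_values_after; infer_instance
def pvWitness_values_after : List String × String := (["a", "", "b", "c", "d", "e", "", "g"], "Src")

def Spec_values_after (mylist : List String) (after_value : String) (out : List String) : Prop := out = values_after_alt mylist after_value
instance (mylist : List String) (after_value : String) (out : List String) : Decidable (Spec_values_after mylist after_value out) := by unfold Spec_values_after; infer_instance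

-- ===== CLAIM (what is proved, stated in full; the proofs are below) =====
def Claim_equal_values_after : Prop := ∀ (mylist : List String) (after_value : String), Dom_values_after mylist after_value → Pre_values_after mylist after_value → Spec_values_after mylist after_value (values_after mylist after_value)

-- ===== LEMMAS AND PROOFS =====

-- A's loop over range(a, a+n) with try/except collects the non-empty items of the window.
theorem window_loop_eq (xs : List String) (n : Nat) :
    ∀ (a : Nat) (init : List String),
    (PySem.List.pyRange (a : Int) ((a : Int) + (n : Int)) 1).foldl
      (fun acc i =>
        match PySem.List.pyGet? xs i with
        | some v => if v ≠ "" then acc ++ [v] else acc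
        | none => acc) init
    = init ++ ((xs.drop a).take n).filter (fun v => v ≠ "") := by
  induction n with
  | zero =>
      intro a init
      simp [PySem.List.pyRange]
  | succ n ih =>
      intro a init
      have hab : (a : Int) < (a : Int) + ((n : Int) + 1) := by omega
      rw [show ((a : Int) + ((n : Nat).succ : Int)) = (a : Int) + ((n : Int) + 1) by push_cast; ring]
      rw [PySem.List.pyRange_one_cons hab]
      rw [List.foldl_cons]
      have hstep : ((a : Int) + 1) = ((a + 1 : Nat) : Int) := by push_cast; ring
      have harg : ((a : Int) + ((n : Int) + 1)) = ((a + 1 : Nat) : Int) + (n : Int) := by push_cast; ring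
      rw [harg, hstep, PySem.List.pyGet?_natCast]
      cases hge : xs[a]? with
      | none =>
          have hlen : xs.length ≤ a := List.getElem?_eq_none_iff.mp hge
          have h1 : xs.drop a = [] := List.drop_eq_nil_of_le hlen
          have h2 : xs.drop (a + 1) = [] := List.drop_eq_nil_of_le (by omega)
          simp only [ih (a + 1) init, h1, h2]
          simp
      | some v =>
          have hlt : a < xs.length := by
            rcases Nat.lt_or_ge a xs.length with h | h
            · exact h
            · simp [List.getElem?_eq_none h] at hge
          have hdrop : xs.drop a = v :: xs.drop (a + 1) := by
            have hv : xs[a] = v := by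
              have := List.getElem?_eq_getElem hlt
              rw [hge] at this; exact (Option.some_injective _ this.symm)
            rw [← hv]
            exact (List.getElem_cons_drop hlt).symm
          by_cases hv : v = ""
          · subst hv
            simp only [ih (a + 1), hdrop]
            simp
          · simp only [ih (a + 1), hdrop]
            simp [hv]

-- B's enumerate scan, filtered by position ∈ [s+d, s+d+n), equals the window filter.
theorem enum_scan_eq (xs : List String) :
    ∀ (s d n : Nat),
    ((PySem.List.enumerate xs (s : Int)).filter
      (fun p => decide (((s : Int) + (d : Int)) ≤ p.1) &&
                decide (p.1 < ((s : Int) + (d : Int)) + (n : Int)) &&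
                decide (p.2 ≠ ""))).map (·.2)
    = ((xs.drop d).take n).filter (fun v => v ≠ "") := by
  induction xs with
  | nil => intro s d n; simp [PySem.List.enumerate_nil]
  | cons x xs ih =>
    intro s d n
    rw [PySem.List.enumerate_cons, List.filter_cons]
    cases d with
    | zero =>
        cases n with
        | zero =>
            -- empty window: the head fails the upper bound; every tail index ≥ s+1 > s fails too
            have htail : (PySem.List.enumerate xs ((s : Int) + 1)).filter
                (fun p => decide (((s : Int) + ((0 : Nat) : Int)) ≤ p.1) &&
                          decide (p.1 < ((s : Int) + ((0 : Nat) : Int)) + (((0 : Nat)) : Int)) &&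
                          decide (p.2 ≠ "")) = [] := by
              apply List.filter_eq_nil_iff.mpr
              intro p hp
              rcases (PySem.List.mem_enumerate_iff _ _ _).mp hp with ⟨k, hk, rfl⟩
              simp only [Bool.and_eq_true, decide_eq_true_eq]
              intro h
              omega
            have hhead : (decide (((s : Int) + ((0 : Nat) : Int)) ≤ ((s : Int), x).1) &&
                decide (((s : Int), x).1 < ((s : Int) + ((0 : Nat) : Int)) + (((0 : Nat)) : Int)) &&
                decide (((s : Int), x).2 ≠ "")) = false := by
              simp only [Bool.and_eq_false_iff]
              left; right
              simp only [decide_eq_false_iff_not]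
              omega
            rw [hhead, if_neg (by simp), htail]
            simp
        | succ m =>
            -- head index s is inside [s, s+m+1): kept iff x ≠ ""
            have htail := ih (s + 1) 0 m
            have hcongr : (PySem.List.enumerate xs ((s : Int) + 1)).filter
                (fun p => decide (((s : Int) + ((0 : Nat) : Int)) ≤ p.1) &&
                          decide (p.1 < ((s : Int) + ((0 : Nat) : Int)) + (((m+1 : Nat)) : Int)) &&
                          decide (p.2 ≠ ""))
                = (PySem.List.enumerate xs (((s+1 : Nat) : Int))).filter
                (fun p => decide ((((s+1 : Nat) : Int) + ((0 : Nat) : Int)) ≤ p.1) &&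
                          decide (p.1 < (((s+1 : Nat) : Int) + ((0 : Nat) : Int)) + ((m : Nat) : Int)) &&
                          decide (p.2 ≠ "")) := by
              rw [show ((s : Int) + 1) = ((s + 1 : Nat) : Int) by push_cast; ring]
              apply List.filter_congr
              intro p hp
              rcases (PySem.List.mem_enumerate_iff _ _ _).mp hp with ⟨k, hk, rfl⟩
              congr 1
              · congr 1
                · rw [decide_eq_decide]; push_cast; omega
                · rw [decide_eq_decide]; push_cast; omega
            have hhead : (decide (((s : Int) + ((0 : Nat) : Int)) ≤ ((s : Int), x).1) &&
                decide (((s : Int), x).1 < ((s : Int) + ((0 : Nat) : Int)) + (((m+1 : Nat)) : Int)) &&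
                decide (((s : Int), x).2 ≠ "")) = decide (x ≠ "") := by
              have h1 : decide (((s : Int) + ((0 : Nat) : Int)) ≤ ((s : Int), x).1) = true := by
                simp
              have h2 : decide (((s : Int), x).1 < ((s : Int) + ((0 : Nat) : Int)) + (((m+1 : Nat)) : Int)) = true := by
                simp only [decide_eq_true_eq]
                push_cast; omega
              rw [h1, h2]; rfl
            rw [hhead, hcongr]
            by_cases hx : x = ""
            · subst hx
              rw [if_neg (by simp), htail]
              simp
            · rw [if_pos (by simp [hx])]
              simp only [List.map_cons, htail, List.drop_zero, List.take_succ_cons, List.filter_cons]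
              simp [hx]
    | succ d =>
        -- head index s < s+d+1: dropped; the tail is the same window one step further
        have htail := ih (s + 1) d n
        have hcongr : (PySem.List.enumerate xs ((s : Int) + 1)).filter
            (fun p => decide (((s : Int) + (((d+1 : Nat)) : Int)) ≤ p.1) &&
                      decide (p.1 < ((s : Int) + (((d+1 : Nat)) : Int)) + ((n : Nat) : Int)) &&
                      decide (p.2 ≠ ""))
            = (PySem.List.enumerate xs (((s+1 : Nat) : Int))).filter
            (fun p => decide ((((s+1 : Nat) : Int) + ((d : Nat) : Int)) ≤ p.1) &&
                      decide (p.1 < (((s+1 : Nat) : Int) + ((d : Nat) : Int)) + ((n : Nat) : Int)) &&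
                      decide (p.2 ≠ "")) := by
          rw [show ((s : Int) + 1) = ((s + 1 : Nat) : Int) by push_cast; ring]
          apply List.filter_congr
          intro p hp
          congr 1
          · congr 1
            · rw [decide_eq_decide]; push_cast; omega
            · rw [decide_eq_decide]; push_cast; omega
        have hhead : (decide (((s : Int) + (((d+1 : Nat)) : Int)) ≤ ((s : Int), x).1) &&
            decide (((s : Int), x).1 < ((s : Int) + (((d+1 : Nat)) : Int)) + ((n : Nat) : Int)) &&
            decide (((s : Int), x).2 ≠ "")) = false := by
          simp only [Bool.and_eq_false_iff]
          left; left
          simp only [decide_eq_false_iff_not]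
          push_cast; omega
        rw [hhead, if_neg (by simp), hcongr, htail, List.drop_succ_cons]

theorem values_after_spec : Claim_equal_values_after := by
  intro mylist after_value _ hpre
  have key : ∀ (a : Nat),
      (PySem.List.pyRange ((a : Nat) : Int) (((a : Nat) : Int) + (5 : Int)) 1).foldl
        (fun acc i =>
          match PySem.List.pyGet? mylist i with
          | some v => if v ≠ "" then acc ++ [v] else acc
          | none => acc) []
      = ((PySem.List.enumerate mylist 0).filter
          (fun p => decide ((a : Int) ≤ p.1) && decide (p.1 < (a : Int) + 5) && decide (p.2 ≠ ""))).map (·.2) := by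
    intro a
    rw [show ((a : Int) + (5 : Int)) = ((a : Int) + ((5 : Nat) : Int)) from rfl,
        window_loop_eq mylist 5 a []]
    have h := enum_scan_eq mylist 0 a 5
    simp only [Nat.cast_zero, zero_add, Nat.cast_ofNat] at h
    rw [List.nil_append]
    exact h.symm
  unfold Spec_values_after values_after values_after_alt
  rcases hpre with h | h | h <;> subst h
  · simp only [String.reduceBEq, Bool.false_eq_true, if_false, if_true]
    rw [show (PySem.Dict.ofList [("Src",(5:Int)),("Dst",10),("Ser",15)]).get? "Src" = some 5 from by decide]
    exact key 5
  · simp only [String.reduceBEq, Bool.false_eq_true, if_false, if_true]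
    rw [show (PySem.Dict.ofList [("Src",(5:Int)),("Dst",10),("Ser",15)]).get? "Dst" = some 10 from by decide]
    exact key 10
  · simp only [String.reduceBEq, Bool.false_eq_true, if_false, if_true]
    rw [show (PySem.Dict.ofList [("Src",(5:Int)),("Dst",10),("Ser",15)]).get? "Ser" = some 15 from by decide]
    exact key 15
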